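-- pv_equiv track=rewrite | github.com/klusik/Python | 004 -- Trénovací den 001/KlusikTrideniSelectSort.py | nejmensiCislo
-- ===== SOURCE A (Python) =====
-- def nejmensiCislo(hledatOd, seznam):
--
--     # nastavime, ze prvni cislo je nejmensi
--     nejmensi = seznam[hledatOd]
--
--     # prohledám seznam čísel od počátku (nebudu řešit to, co už je setříděný)
--     posledniVyskytIndex = hledatOd
--     for index in range(hledatOd, len(seznam)):
--         if nejmensi > seznam[index]:
--             nejmensi = seznam[index]
--             posledniVyskytIndex = index
--
--
--     # Vrátím hodnotu a její pozici
--     return [nejmensi, posledniVyskytIndex]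
-- ===== SOURCE B (Python) =====
-- def nejmensiCislo(hledatOd, seznam):
--     rest = seznam[hledatOd:]
--     nejmensi = min(rest)
--     return [nejmensi, hledatOd + rest.index(nejmensi)]
-- ===== Notes on version B (the rewrite author's own statement) =====
-- stated objective: idiomatic
-- what changed: Replaces A's hand-written index loop that tracks a running minimum and its position with the built-ins min() and list.index() over the slice seznam[hledatOd:].
-- intended difference: For negative start positions (reachable only through Python's index wraparound) whose prefix holds an element smaller than every element of the suffix, A rescans the whole list and returns the global minimum with its index, while B returns the minimum of the suffix seznam[hledatOd:] with its (negative) position - the intended slice reading of 'search from hledatOd'. — e.g. on nejmensiCislo(-1, [0, 5]): A returns [0, 0], B returns [5, -1]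
import Mathlib
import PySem

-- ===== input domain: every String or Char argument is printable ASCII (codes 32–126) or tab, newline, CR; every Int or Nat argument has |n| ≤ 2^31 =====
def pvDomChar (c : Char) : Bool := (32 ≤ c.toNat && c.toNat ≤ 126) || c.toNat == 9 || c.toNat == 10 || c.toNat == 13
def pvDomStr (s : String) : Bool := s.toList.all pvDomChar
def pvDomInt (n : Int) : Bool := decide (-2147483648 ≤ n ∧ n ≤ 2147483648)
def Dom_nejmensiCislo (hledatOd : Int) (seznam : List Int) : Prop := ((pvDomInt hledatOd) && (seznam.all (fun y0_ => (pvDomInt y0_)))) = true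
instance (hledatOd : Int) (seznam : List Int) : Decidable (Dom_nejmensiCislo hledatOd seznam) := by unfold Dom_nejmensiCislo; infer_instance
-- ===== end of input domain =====

-- B replaces A's hand-written running-minimum index loop with the built-ins min() and
-- list.index() over the slice seznam[hledatOd:] (objective: idiomatic; same O(n) cost).

-- ===== PORT A =====
-- the body of A's for-loop: compare seznam[index] with the running minimum
def nejmensiCisloStep (seznam : List Int) (st : Int × Int) (index : Int) : Int × Int :=
  match PySem.List.pyGet? seznam index with
  | none => st            -- IndexError: unreachable under Pre_
  | some v => if st.1 > v then (v, index) else st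

def nejmensiCislo (hledatOd : Int) (seznam : List Int) : List Int :=
  match PySem.List.pyGet? seznam hledatOd with
  | none => []            -- IndexError: seznam[hledatOd] out of range, excluded by Pre_
  | some nejmensi =>
    let st := (PySem.List.pyRange hledatOd (seznam.length : Int) 1).foldl
                (nejmensiCisloStep seznam) (nejmensi, hledatOd)
    [st.1, st.2]

-- ===== PORT B =====
def nejmensiCislo_alt (hledatOd : Int) (seznam : List Int) : List Int :=
  let rest := PySem.List.slice seznam (some hledatOd) none
  match PySem.List.min? rest (fun y => y) with
  | none => []            -- ValueError: min() of empty slice, excluded by Pre_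
  | some nejmensi =>
    match PySem.List.index? rest nejmensi with
    | none => []          -- unreachable: the minimum is a member of rest
    | some k => [nejmensi, hledatOd + (k : Int)]

-- ===== PRECONDITION & SPEC =====
-- Pre_ is exactly where Python A returns: seznam[hledatOd] must exist (IndexError otherwise).
def Pre_nejmensiCislo (hledatOd : Int) (seznam : List Int) : Prop :=
  -(seznam.length : Int) ≤ hledatOd ∧ hledatOd < (seznam.length : Int)
instance (hledatOd : Int) (seznam : List Int) : Decidable (Pre_nejmensiCislo hledatOd seznam) := by
  unfold Pre_nejmensiCislo; infer_instance
def pvWitness_nejmensiCislo : Int × List Int := (0, [3])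

-- For negative start positions (reachable only through Python's index wraparound) whose prefix
-- holds an element smaller than every element of the suffix, A rescans the whole list and
-- returns the global minimum with its index, while B returns the minimum of the suffix
-- seznam[hledatOd:] with its (negative) position — the intended slice reading of
-- "search from hledatOd".
def D_nejmensiCislo (hledatOd : Int) (seznam : List Int) : Prop :=
  hledatOd < 0 ∧
    ∃ x ∈ seznam.take ((seznam.length : Int) + hledatOd).toNat,
      ∀ y ∈ seznam.drop ((seznam.length : Int) + hledatOd).toNat, x < y
instance (hledatOd : Int) (seznam : List Int) : Decidable (D_nejmensiCislo hledatOd seznam) := by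
  unfold D_nejmensiCislo; infer_instance

def Spec_nejmensiCislo (hledatOd : Int) (seznam : List Int) (out : List Int) : Prop :=
  ¬ D_nejmensiCislo hledatOd seznam → out = nejmensiCislo_alt hledatOd seznam
instance (hledatOd : Int) (seznam : List Int) (out : List Int) : Decidable (Spec_nejmensiCislo hledatOd seznam out) := by
  unfold Spec_nejmensiCislo; infer_instance

def pvDiffWitness_nejmensiCislo : Int × List Int := (-1, [0, 5])
def pvDiffWitnessOut_nejmensiCislo : (List Int) × (List Int) := ([0, 0], [5, -1])

-- ===== CLAIM (what is proved, stated in full; the proofs are below) =====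
def Claim_unchanged_nejmensiCislo : Prop := ∀ (hledatOd : Int) (seznam : List Int), Dom_nejmensiCislo hledatOd seznam → Pre_nejmensiCislo hledatOd seznam → Spec_nejmensiCislo hledatOd seznam (nejmensiCislo hledatOd seznam)
def Claim_changed_nejmensiCislo : Prop := Dom_nejmensiCislo (pvDiffWitness_nejmensiCislo.1) (pvDiffWitness_nejmensiCislo.2) ∧ Pre_nejmensiCislo (pvDiffWitness_nejmensiCislo.1) (pvDiffWitness_nejmensiCislo.2) ∧ D_nejmensiCislo (pvDiffWitness_nejmensiCislo.1) (pvDiffWitness_nejmensiCislo.2) ∧ nejmensiCislo (pvDiffWitness_nejmensiCislo.1) (pvDiffWitness_nejmensiCislo.2) = pvDiffWitnessOut_nejmensiCislo.1 ∧ nejmensiCislo_alt (pvDiffWitness_nejmensiCislo.1) (pvDiffWitness_nejmensiCislo.2) = pvDiffWitnessOut_nejmensiCislo.2 ∧ pvDiffWitnessOut_nejmensiCislo.1 ≠ pvDiffWitnessOut_nejmensiCislo.2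
def Claim_exact_nejmensiCislo : Prop := ∀ (hledatOd : Int) (seznam : List Int), Dom_nejmensiCislo hledatOd seznam → Pre_nejmensiCislo hledatOd seznam → D_nejmensiCislo hledatOd seznam → nejmensiCislo hledatOd seznam ≠ nejmensiCislo_alt hledatOd seznam

-- ===== LEMMAS AND PROOFS =====

-- A's loop over the remaining indices, abstracted to the list of scanned values:
-- state (current minimum, its recorded index), j = Python index of the next value.
def g0 : Int × Int → Int → List Int → Int × Int
  | st, _, [] => st
  | st, j, x :: t => g0 (if st.1 > x then (x, j) else st) (j + 1) t

lemma fmin_le_init (t : List Int) : ∀ (a : Int), t.foldl min a ≤ a := by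
  induction t with
  | nil => intro a; simp
  | cons x t ih =>
    intro a
    calc t.foldl min (min a x) ≤ min a x := ih (min a x)
    _ ≤ a := min_le_left a x

lemma fmin_le_mem (t : List Int) : ∀ (a x : Int), x ∈ t → t.foldl min a ≤ x := by
  induction t with
  | nil => intro a x hx; simp at hx
  | cons y t ih =>
    intro a x hx
    rcases List.mem_cons.mp hx with h | h
    · subst h
      calc t.foldl min (min a x) ≤ min a x := fmin_le_init t _
      _ ≤ x := min_le_right a x
    · exact ih (min a y) x h

lemma fmin_le_cons (t : List Int) (a x : Int) (hx : x ∈ a :: t) : t.foldl min a ≤ x := by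
  rcases List.mem_cons.mp hx with h | h
  · subst h; exact fmin_le_init t x
  · exact fmin_le_mem t a x h

lemma idxOf?_eq_some_idxOf (l : List Int) (a : Int) (h : a ∈ l) :
    l.idxOf? a = some (l.idxOf a) := by
  induction l with
  | nil => simp at h
  | cons b l ih =>
    by_cases hba : b = a
    · subst hba; simp [List.idxOf?_cons, List.idxOf_cons_self]
    · simp only [List.idxOf?_cons, List.idxOf_cons_ne _ hba]
      simp only [beq_iff_eq, hba, if_false]
      have hm : a ∈ l := by
        rcases List.mem_cons.mp h with h1 | h1
        · exact absurd h1.symm hba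
        · exact h1
      rw [ih hm]; rfl

lemma g0_spec (t : List Int) : ∀ (v0 ia j : Int),
    g0 (v0, ia) j t =
      if t.foldl min v0 < v0 then
        (t.foldl min v0, j + ((t.idxOf (t.foldl min v0) : Nat) : Int))
      else (v0, ia) := by
  induction t with
  | nil => intro v0 ia j; simp [g0]
  | cons x t ih =>
    intro v0 ia j
    by_cases hx : x < v0
    · have hseed : g0 (v0, ia) j (x :: t) = g0 (x, j) (j + 1) t := by
        simp [g0, hx]
      have hmin : min v0 x = x := min_eq_right hx.le
      have hM : t.foldl min x < v0 := lt_of_le_of_lt (fmin_le_init t x) hx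
      rw [hseed, ih x j (j + 1)]
      simp only [List.foldl_cons, hmin, if_pos hM]
      by_cases hMx : t.foldl min x < x
      · have hne : x ≠ t.foldl min x := (ne_of_gt hMx)
        rw [if_pos hMx, List.idxOf_cons_ne _ hne]
        simp only [Prod.mk.injEq, true_and]
        push_cast
        ring
      · have hEq : t.foldl min x = x := le_antisymm (fmin_le_init t x) (not_lt.mp hMx)
        rw [if_neg hMx]
        rw [hEq, List.idxOf_cons_self]
        simp
    · have hseed : g0 (v0, ia) j (x :: t) = g0 (v0, ia) (j + 1) t := by
        simp [g0, hx]
      have hmin : min v0 x = v0 := min_eq_left (not_lt.mp hx)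
      rw [hseed, ih v0 ia (j + 1)]
      simp only [List.foldl_cons, hmin]
      by_cases hM : t.foldl min v0 < v0
      · have hne : x ≠ t.foldl min v0 :=
          ne_of_gt (lt_of_lt_of_le hM (not_lt.mp hx))
        rw [if_pos hM, if_pos hM, List.idxOf_cons_ne _ hne]
        simp only [Prod.mk.injEq, true_and]
        push_cast
        ring
      · rw [if_neg hM, if_neg hM]

-- first visiting the seed's own position leaves the state, then the tail is scanned
lemma g0_core (v0 : Int) (t : List Int) (j : Int) :
    g0 (v0, j) j (v0 :: t) =
      (t.foldl min v0, j + (((v0 :: t).idxOf (t.foldl min v0) : Nat) : Int)) := by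
  have h1 : g0 (v0, j) j (v0 :: t) = g0 (v0, j) (j + 1) t := by
    simp [g0]
  rw [h1, g0_spec t v0 j (j + 1)]
  by_cases hM : t.foldl min v0 < v0
  · have hne : v0 ≠ t.foldl min v0 := ne_of_gt hM
    rw [if_pos hM, List.idxOf_cons_ne _ hne]
    simp only [Prod.mk.injEq, true_and]
    push_cast
    ring
  · have hEq : t.foldl min v0 = v0 := le_antisymm (fmin_le_init t v0) (not_lt.mp hM)
    rw [if_neg hM, hEq, List.idxOf_cons_self]
    simp

lemma g0_const (t : List Int) : ∀ (st : Int × Int) (j : Int),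
    (∀ x ∈ t, st.1 ≤ x) → g0 st j t = st := by
  induction t with
  | nil => intro st j _; rfl
  | cons x t ih =>
    intro st j h
    have hx : st.1 ≤ x := h x (List.mem_cons_self)
    have : g0 st j (x :: t) = g0 st (j + 1) t := by
      simp [g0, not_lt.mpr hx]
    rw [this]
    exact ih st (j + 1) (fun y hy => h y (List.mem_cons_of_mem x hy))

lemma g0_fst_le (t : List Int) : ∀ (st : Int × Int) (j : Int),
    (g0 st j t).1 ≤ st.1 ∧ ∀ x ∈ t, (g0 st j t).1 ≤ x := by
  induction t with
  | nil => intro st j; exact ⟨le_refl _, by simp⟩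
  | cons x t ih =>
    intro st j
    have hstep : g0 st j (x :: t) = g0 (if st.1 > x then (x, j) else st) (j + 1) t := rfl
    set st' := if st.1 > x then (x, j) else st with hst'
    have h1 : st'.1 ≤ st.1 := by
      rw [hst']; split_ifs with h
      · exact le_of_lt h
      · exact le_refl _
    have h2 : st'.1 ≤ x := by
      rw [hst']; split_ifs with h
      · exact le_refl _
      · exact not_lt.mp h
    obtain ⟨ha, hb⟩ := ih st' (j + 1)
    refine ⟨hstep ▸ le_trans ha h1, ?_⟩
    intro y hy
    rcases List.mem_cons.mp hy with h | h
    · subst h; exact hstep ▸ le_trans ha h2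
    · exact hstep ▸ hb y h

-- A's fold over range(j, len(s)) for 0 ≤ j is g0 over the suffix s.drop j
lemma foldA_nonneg (s : List Int) : ∀ (t : List Int) (j : Int) (st : Int × Int),
    0 ≤ j → t = s.drop j.toNat →
    (PySem.List.pyRange j (s.length : Int) 1).foldl (nejmensiCisloStep s) st = g0 st j t := by
  intro t
  induction t with
  | nil =>
    intro j st hj ht
    have hlen : (s.length : Int) ≤ j := by
      have := List.drop_eq_nil_iff.mp ht.symm
      omega
    rw [PySem.List.pyRange_one_eq_nil hlen]
    rfl
  | cons x t ih =>
    intro j st hj ht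
    have hlt : j.toNat < s.length := by
      by_contra hc
      have : s.drop j.toNat = [] := List.drop_eq_nil_iff.mpr (by omega)
      rw [← ht] at this
      simp at this
    have hjlt : j < (s.length : Int) := by omega
    have hget : PySem.List.pyGet? s j = some x := by
      rw [PySem.List.pyGet?_of_nonneg_of_lt s hj hjlt]
      have h0 : (s.drop j.toNat)[0]? = s[j.toNat + 0]? := List.getElem?_drop
      rw [← ht] at h0
      simpa using h0.symm
    rw [PySem.List.pyRange_one_cons hjlt, List.foldl_cons]
    have hstep : nejmensiCisloStep s st j = if st.1 > x then (x, j) else st := by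
      simp [nejmensiCisloStep, hget]
    rw [hstep]
    have ht' : t = s.drop (j + 1).toNat := by
      have h1 : t = List.drop 1 (x :: t) := rfl
      rw [h1, ht, List.drop_drop]
      congr 1
      omega
    exact ih (j + 1) _ (by omega) ht'

-- A's fold over the negative indices range(j, 0) is g0 over the suffix s.drop (len + j)
lemma foldA_neg (s : List Int) : ∀ (t : List Int) (j : Int) (st : Int × Int),
    j < 0 → -(s.length : Int) ≤ j → t = s.drop ((s.length : Int) + j).toNat →
    (PySem.List.pyRange j 0 1).foldl (nejmensiCisloStep s) st = g0 st j t := by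
  intro t
  induction t with
  | nil =>
    intro j st hj hjl ht
    exfalso
    have := List.drop_eq_nil_iff.mp ht.symm
    omega
  | cons x t ih =>
    intro j st hj hjl ht
    have hk : 0 < (-j).toNat := by omega
    have hk2 : (-j).toNat ≤ s.length := by omega
    have hjeq : j = -(((-j).toNat : Nat) : Int) := by omega
    have hidx : s.length - (-j).toNat = ((s.length : Int) + j).toNat := by omega
    have hget : PySem.List.pyGet? s j = some x := by
      rw [hjeq, PySem.List.pyGet?_neg_natCast s (-j).toNat hk hk2, hidx]
      have h0 : (s.drop ((s.length : Int) + j).toNat)[0]? = s[((s.length : Int) + j).toNat + 0]? :=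
        List.getElem?_drop
      rw [← ht] at h0
      simpa using h0.symm
    rw [PySem.List.pyRange_one_cons (by omega : j < 0), List.foldl_cons]
    have hstep : nejmensiCisloStep s st j = if st.1 > x then (x, j) else st := by
      simp [nejmensiCisloStep, hget]
    rw [hstep]
    by_cases hj1 : j + 1 < 0
    · have ht' : t = s.drop ((s.length : Int) + (j + 1)).toNat := by
        have h1 : t = List.drop 1 (x :: t) := rfl
        rw [h1, ht, List.drop_drop]
        congr 1
        omega
      exact ih (j + 1) _ hj1 (by omega) ht'
    · have hj0 : j + 1 = 0 := by omega
      have htnil : t = [] := by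
        have hlen := congrArg List.length ht
        simp [List.length_drop] at hlen
        have h0 : t.length = 0 := by omega
        exact List.eq_nil_of_length_eq_zero h0
      rw [hj0, PySem.List.pyRange_one_eq_nil (le_refl 0), htnil]
      rfl

-- B's result when the slice seznam[hledatOd:] is v0 :: t
lemma B_char (hled : Int) (s : List Int) (v0 : Int) (t : List Int)
    (hrest : PySem.List.slice s (some hled) none = v0 :: t) :
    nejmensiCislo_alt hled s =
      [t.foldl min v0, hled + (((v0 :: t).idxOf (t.foldl min v0) : Nat) : Int)] := by
  have hmem : t.foldl min v0 ∈ v0 :: t :=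
    PySem.List.min?_mem (PySem.List.min?_id_cons v0 t)
  simp only [nejmensiCislo_alt, hrest, PySem.List.min?_id_cons,
    PySem.List.index?_eq_idxOf?, idxOf?_eq_some_idxOf _ _ hmem]

theorem nejmensiCislo_spec : Claim_unchanged_nejmensiCislo := by
  intro hled s _hdom hpre hD
  obtain ⟨hlo, hhi⟩ := hpre
  by_cases hneg : 0 ≤ hled
  · -- non-negative start: one scan over the suffix on both sides
    have hlt : hled.toNat < s.length := by omega
    cases hrest : s.drop hled.toNat with
    | nil =>
      exfalso
      have := List.drop_eq_nil_iff.mp hrest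
      omega
    | cons v0 t =>
      have hslice : PySem.List.slice s (some hled) none = v0 :: t := by
        rw [PySem.List.slice_from s hneg, hrest]
      have hget : PySem.List.pyGet? s hled = some v0 := by
        rw [PySem.List.pyGet?_of_nonneg_of_lt s hneg (by omega)]
        have h0 : (s.drop hled.toNat)[0]? = s[hled.toNat + 0]? := List.getElem?_drop
        rw [hrest] at h0
        simpa using h0.symm
      have hfold := foldA_nonneg s (v0 :: t) hled (v0, hled) hneg hrest.symm
      rw [B_char hled s v0 t hslice]
      simp only [nejmensiCislo, hget]
      rw [hfold, g0_core]
  · -- negative start: A scans the suffix, then rescans the whole list without effect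
    push Not at hneg
    set k : Nat := ((s.length : Int) + hled).toNat with hk
    have hklt : k < s.length := by omega
    cases hrest : s.drop k with
    | nil =>
      exfalso
      have := List.drop_eq_nil_iff.mp hrest
      omega
    | cons v0 t =>
      have hm : 0 < (-hled).toNat := by omega
      have hm2 : (-hled).toNat ≤ s.length := by omega
      have hheq : hled = -(((-hled).toNat : Nat) : Int) := by omega
      have hslice : PySem.List.slice s (some hled) none = v0 :: t := by
        rw [hheq, PySem.List.slice_from_neg_natCast s (-hled).toNat hm]
        have : s.length - (-hled).toNat = k := by omega
        rw [this, hrest]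
      have hget : PySem.List.pyGet? s hled = some v0 := by
        rw [hheq, PySem.List.pyGet?_neg_natCast s (-hled).toNat hm hm2]
        have hidx : s.length - (-hled).toNat = k := by omega
        rw [hidx]
        have h0 : (s.drop k)[0]? = s[k + 0]? := List.getElem?_drop
        rw [hrest] at h0
        simpa using h0.symm
      have hsplit : PySem.List.pyRange hled (s.length : Int) 1 =
          PySem.List.pyRange hled 0 1 ++ PySem.List.pyRange 0 (s.length : Int) 1 :=
        PySem.List.pyRange_one_append hled 0 (s.length : Int) (by omega) (by omega)
      have hfold1 := foldA_neg s (v0 :: t) hled (v0, hled) hneg (by omega) hrest.symm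
      set M : Int := t.foldl min v0 with hM
      -- ¬D means the minimum of the suffix is ≤ every element of the whole list
      have hMle : ∀ x ∈ s, M ≤ x := by
        intro x hx
        rw [← List.take_append_drop k s] at hx
        rcases List.mem_append.mp hx with hx | hx
        · -- prefix element: some suffix element is ≤ it
          simp only [D_nejmensiCislo, not_and, not_exists] at hD
          have := hD hneg
          push Not at this
          obtain ⟨y, hy, hxy⟩ := this x (by rw [← hk]; exact hx)
          rw [← hk, hrest] at hy
          exact le_trans (fmin_le_cons t v0 y hy) hxy
        · rw [hrest] at hx
          exact fmin_le_cons t v0 x hx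
      have hfold2 := foldA_nonneg s s 0 (g0 (v0, hled) hled (v0 :: t)) (le_refl 0) (by simp)
      have hconst : g0 (g0 (v0, hled) hled (v0 :: t)) 0 s = g0 (v0, hled) hled (v0 :: t) := by
        apply g0_const
        intro x hx
        rw [g0_core, ← hM]
        exact hMle x hx
      rw [B_char hled s v0 t hslice]
      simp only [nejmensiCislo, hget, hsplit, List.foldl_append]
      rw [hfold1, hfold2, hconst, g0_core]

theorem nejmensiCislo_changed : Claim_changed_nejmensiCislo := by
  unfold Claim_changed_nejmensiCislo; decide

theorem nejmensiCislo_tight : Claim_exact_nejmensiCislo := by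
  intro hled s _hdom hpre hD
  obtain ⟨hlo, hhi⟩ := hpre
  obtain ⟨hneg, x, hxmem, hxlt⟩ := hD
  set k : Nat := ((s.length : Int) + hled).toNat with hk
  have hklt : k < s.length := by omega
  cases hrest : s.drop k with
  | nil =>
    exfalso
    have := List.drop_eq_nil_iff.mp hrest
    omega
  | cons v0 t =>
    have hm : 0 < (-hled).toNat := by omega
    have hm2 : (-hled).toNat ≤ s.length := by omega
    have hheq : hled = -(((-hled).toNat : Nat) : Int) := by omega
    have hslice : PySem.List.slice s (some hled) none = v0 :: t := by
      rw [hheq, PySem.List.slice_from_neg_natCast s (-hled).toNat hm]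
      have : s.length - (-hled).toNat = k := by omega
      rw [this, hrest]
    have hget : PySem.List.pyGet? s hled = some v0 := by
      rw [hheq, PySem.List.pyGet?_neg_natCast s (-hled).toNat hm hm2]
      have hidx : s.length - (-hled).toNat = k := by omega
      rw [hidx]
      have h0 : (s.drop k)[0]? = s[k + 0]? := List.getElem?_drop
      rw [hrest] at h0
      simpa using h0.symm
    set M : Int := t.foldl min v0 with hM
    -- x (a prefix element) is strictly below the suffix minimum M
    have hMmem : M ∈ v0 :: t := PySem.List.min?_mem (PySem.List.min?_id_cons v0 t)
    have hxM : x < M := by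
      apply hxlt
      rw [hrest]
      exact hMmem
    have hxs : x ∈ s := by
      rw [← List.take_append_drop k s]
      exact List.mem_append.mpr (Or.inl hxmem)
    -- A's final value sinks to ≤ x < M, while B returns M
    have hsplit : PySem.List.pyRange hled (s.length : Int) 1 =
        PySem.List.pyRange hled 0 1 ++ PySem.List.pyRange 0 (s.length : Int) 1 :=
      PySem.List.pyRange_one_append hled 0 (s.length : Int) (by omega) (by omega)
    have hfold1 := foldA_neg s (v0 :: t) hled (v0, hled) hneg (by omega) hrest.symm
    have hfold2 := foldA_nonneg s s 0 (g0 (v0, hled) hled (v0 :: t)) (le_refl 0) (by simp)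
    have hA : nejmensiCislo hled s =
        [(g0 (g0 (v0, hled) hled (v0 :: t)) 0 s).1, (g0 (g0 (v0, hled) hled (v0 :: t)) 0 s).2] := by
      simp only [nejmensiCislo, hget, hsplit, List.foldl_append, hfold1, hfold2]
    have hAle : (g0 (g0 (v0, hled) hled (v0 :: t)) 0 s).1 ≤ x :=
      (g0_fst_le s _ 0).2 x hxs
    rw [hA, B_char hled s v0 t hslice]
    intro hcontra
    have : (g0 (g0 (v0, hled) hled (v0 :: t)) 0 s).1 = M := (List.cons.inj hcontra).1
    omega
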